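-- pv_equiv track=rewrite | github.com/Fishcuit/AhluicSim | forShane/simOutput2.py | dfs
-- ===== SOURCE A (Python) =====
-- def dfs(i, j, grid, wild='WD'):
--     symbol = grid[i][j]
--     if symbol == wild:
--         return set()
--
--     stack = [(i, j)]
--     visited = set()
--     cluster_cells = set()
--     while stack:
--         x, y = stack.pop()
--         if (x, y) in visited:
--             continue
--         visited.add((x, y))
--         cluster_cells.add((x, y))
--         for dx, dy in [(0, 1), (0, -1), (1, 0), (-1, 0)]:
--             nx, ny = x + dx, y + dy
--             if 0 <= nx < len(grid) and 0 <= ny < len(grid[0]):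
--                 if grid[nx][ny] == symbol or grid[nx][ny] == wild:
--                     stack.append((nx, ny))
--
--     return cluster_cells if len(cluster_cells) >= 4 else set()
-- ===== SOURCE B (Python) =====
-- def dfs(i, j, grid, wild='WD'):
--     symbol = grid[i][j]
--     if symbol == wild:
--         return set()
--
--     cluster = set()
--
--     def _fill(x, y):
--         if (x, y) in cluster:
--             return
--         cluster.add((x, y))
--         for dx, dy in ((-1, 0), (1, 0), (0, -1), (0, 1)):
--             nx, ny = x + dx, y + dy
--             if 0 <= nx < len(grid) and 0 <= ny < len(grid[0]) and (grid[nx][ny] == symbol or grid[nx][ny] == wild):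
--                 _fill(nx, ny)
--
--     _fill(i, j)
--     return cluster if len(cluster) >= 4 else set()
-- ===== Notes on version B (the rewrite author's own statement) =====
-- stated objective: simpler
-- what changed: Replaces the explicit worklist stack plus the redundant pair of sets (visited and cluster_cells, which always hold the same elements) by a recursive flood-fill helper that threads a single cluster set; Pre_ excludes inputs where Python A raises IndexError (start index out of range, or a ragged grid whose short rows the neighbour probe can reach).
-- outside the precondition, e.g. on dfs(0, 0, [['A', 'B'], ['C']], 'WD'): A returns set(), B returns set()
import Mathlib
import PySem

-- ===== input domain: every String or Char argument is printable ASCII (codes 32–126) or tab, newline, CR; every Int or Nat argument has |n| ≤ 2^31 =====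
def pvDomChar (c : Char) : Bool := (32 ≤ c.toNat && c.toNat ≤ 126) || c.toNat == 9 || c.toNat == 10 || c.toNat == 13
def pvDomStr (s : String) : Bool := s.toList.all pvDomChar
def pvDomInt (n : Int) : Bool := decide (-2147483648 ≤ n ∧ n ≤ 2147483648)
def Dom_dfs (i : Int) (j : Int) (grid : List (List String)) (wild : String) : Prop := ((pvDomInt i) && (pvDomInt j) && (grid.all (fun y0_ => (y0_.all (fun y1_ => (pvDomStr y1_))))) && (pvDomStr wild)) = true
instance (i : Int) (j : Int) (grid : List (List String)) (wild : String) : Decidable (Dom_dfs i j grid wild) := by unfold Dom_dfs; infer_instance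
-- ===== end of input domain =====

-- B replaces A's explicit worklist stack and redundant visited/cluster_cells set pair by a
-- recursive flood-fill helper threading a single cluster set (same return value; no speed claim).

-- shared cell primitives: grid[p], the bounds test, the symbol/wild match test
def pvCell (grid : List (List String)) (p : Int × Int) : Option String :=
  (PySem.List.pyGet? grid p.1).bind (fun r => PySem.List.pyGet? r p.2)

def pvBnd (grid : List (List String)) (n : Int × Int) : Bool :=
  decide (0 ≤ n.1) && decide (n.1 < (grid.length : Int)) &&
  decide (0 ≤ n.2) && decide (n.2 < (((grid.headD []).length : Int)))

def pvMat (grid : List (List String)) (symbol wild : String) (n : Int × Int) : Bool :=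
  (pvCell grid n == some symbol) || (pvCell grid n == some wild)

-- ===== PORT A =====
-- A's neighbour loop: for (dx,dy) in [(0,1),(0,-1),(1,0),(-1,0)] append matching in-bounds neighbours
def pvDirsA : List (Int × Int) := [(0, 1), (0, -1), (1, 0), (-1, 0)]

-- stack is kept top-at-head (Python appends/pops at the end), so a push is a cons
def pvPush (grid : List (List String)) (symbol wild : String) (p : Int × Int)
    (st : List (Int × Int)) : List (Int × Int) :=
  pvDirsA.foldl (fun s d =>
    let n := (p.1 + d.1, p.2 + d.2)
    if pvBnd grid n = true then
      if pvMat grid symbol wild n = true then n :: s else s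
    else s) st

-- the while-stack loop; fuel only makes it total, pvFuelA is proved sufficient below
def pvLoopA (grid : List (List String)) (symbol wild : String) :
    Nat → List (Int × Int) → List (Int × Int) → List (Int × Int) → Option (List (Int × Int))
  | 0, _, _, _ => none
  | _ + 1, [], _, c => some c
  | f + 1, p :: st, v, c =>
      if p ∈ v then pvLoopA grid symbol wild f st v c
      else pvLoopA grid symbol wild f (pvPush grid symbol wild p st)
             (PySem.Set.add v p) (PySem.Set.add c p)

def pvFuelA (grid : List (List String)) : Nat :=
  5 * (grid.length * (grid.headD []).length) + 16

def dfs (i : Int) (j : Int) (grid : List (List String)) (wild : String) : List (Int × Int) :=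
  match pvCell grid (i, j) with
  | none => []  -- Python raises IndexError here; excluded by Pre_dfs
  | some symbol =>
    if symbol = wild then []
    else
      match pvLoopA grid symbol wild (pvFuelA grid) [(i, j)] [] [] with
      | none => []  -- never happens: pvFuelA is sufficient (proved below)
      | some c => if 4 ≤ c.length then c else []

-- ===== PORT B =====
-- B's neighbour order: for (dx,dy) in ((-1,0),(1,0),(0,-1),(0,1)) recurse on matching in-bounds neighbours
def pvDirsB : List (Int × Int) := [(-1, 0), (1, 0), (0, -1), (0, 1)]

def pvOkB (grid : List (List String)) (symbol wild : String) (n : Int × Int) : Bool :=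
  pvBnd grid n && pvMat grid symbol wild n

-- the recursive _fill helper and its for-loop over the four directions; fuel only makes it total
mutual
def pvFill (grid : List (List String)) (symbol wild : String) :
    Nat → Int × Int → List (Int × Int) → Option (List (Int × Int))
  | 0, _, _ => none
  | f + 1, p, v =>
      if p ∈ v then some v
      else pvFillDirs grid symbol wild f pvDirsB p (PySem.Set.add v p)
termination_by f _ _ => (f, 0)

def pvFillDirs (grid : List (List String)) (symbol wild : String) :
    Nat → List (Int × Int) → Int × Int → List (Int × Int) → Option (List (Int × Int))
  | _, [], _, v => some v
  | f, d :: ds, p, v =>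
      let n := (p.1 + d.1, p.2 + d.2)
      if pvOkB grid symbol wild n = true then
        match pvFill grid symbol wild f n v with
        | none => none
        | some v' => pvFillDirs grid symbol wild f ds p v'
      else pvFillDirs grid symbol wild f ds p v
termination_by f ds _ _ => (f, ds.length + 1)
end

def pvFuelB (grid : List (List String)) : Nat :=
  grid.length * (grid.headD []).length + 8

def dfs_alt (i : Int) (j : Int) (grid : List (List String)) (wild : String) : List (Int × Int) :=
  match pvCell grid (i, j) with
  | none => []  -- Python raises IndexError here; excluded by Pre_dfs
  | some symbol =>
    if symbol = wild then []
    else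
      match pvFill grid symbol wild (pvFuelB grid) (i, j) [] with
      | none => []  -- never happens: pvFuelB is sufficient (proved below)
      | some c => if 4 ≤ c.length then c else []

-- ===== PRECONDITION & SPEC =====
-- Pre_ = the inputs where Python A returns: the start index (i,j) is in range (Python's negative
-- wraparound included), and no row is shorter than row 0, so every in-bounds neighbour probe
-- grid[nx][ny] (A checks ny < len(grid[0])) succeeds.  On ragged grids A raises IndexError as soon
-- as the flood probes a missing cell; Pre_ also excludes the ragged grids whose short rows the
-- flood happens never to probe, on which A returns (see the cite in the claim).
def Pre_dfs (i : Int) (j : Int) (grid : List (List String)) (wild : String) : Prop :=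
  (∀ row ∈ grid, (grid.headD []).length ≤ row.length) ∧
  ((PySem.List.pyGet? grid i).bind (fun r => PySem.List.pyGet? r j)).isSome = true

instance (i : Int) (j : Int) (grid : List (List String)) (wild : String) : Decidable (Pre_dfs i j grid wild) := by unfold Pre_dfs; infer_instance

def pvWitness_dfs : Int × Int × List (List String) × String := (0, 0, [["A", "A"], ["A", "A"]], "WD")

def Spec_dfs (i : Int) (j : Int) (grid : List (List String)) (wild : String) (out : List (Int × Int)) : Prop := out = dfs_alt i j grid wild
instance (i : Int) (j : Int) (grid : List (List String)) (wild : String) (out : List (Int × Int)) : Decidable (Spec_dfs i j grid wild out) := by unfold Spec_dfs; infer_instance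

-- ===== CLAIM (what is proved, stated in full; the proofs are below) =====
def Claim_equal_dfs : Prop := ∀ (i : Int) (j : Int) (grid : List (List String)) (wild : String), Dom_dfs i j grid wild → Pre_dfs i j grid wild → Spec_dfs i j grid wild (dfs i j grid wild)

-- ===== LEMMAS AND PROOFS =====

-- proof-only helpers -------------------------------------------------------

def pvAllCells (grid : List (List String)) : List (Int × Int) :=
  (List.range grid.length).flatMap
    (fun x => (List.range (grid.headD []).length).map (fun y => (Int.ofNat x, Int.ofNat y)))

def pvCells (grid : List (List String)) (p0 : Int × Int) : List (Int × Int) :=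
  p0 :: pvAllCells grid

def pvMu (grid : List (List String)) (p0 : Int × Int) (v : List (Int × Int)) : Nat :=
  ((pvCells grid p0).filter (fun q => decide (q ∉ v))).length

def pvNbr (grid : List (List String)) (symbol wild : String) (p : Int × Int) : List (Int × Int) :=
  (pvDirsB.map (fun d => (p.1 + d.1, p.2 + d.2))).filter (pvOkB grid symbol wild)

def pvFillSeq (grid : List (List String)) (symbol wild : String) :
    Nat → List (Int × Int) → List (Int × Int) → Option (List (Int × Int))
  | _, [], v => some v
  | f, p :: st, v =>
      match pvFill grid symbol wild f p v with
      | none => none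
      | some v' => pvFillSeq grid symbol wild f st v'

-- basic facts --------------------------------------------------------------

theorem pvSet_add_of_not_mem {α : Type} [BEq α] [LawfulBEq α] (v : List α) (p : α)
    (h : p ∉ v) : PySem.Set.add v p = v ++ [p] := by
  simp [PySem.Set.add, h]

theorem pvMem_allCells (grid : List (List String)) (n : Int × Int)
    (h : pvBnd grid n = true) : n ∈ pvAllCells grid := by
  obtain ⟨a, b⟩ := n
  simp only [pvBnd, Bool.and_eq_true, decide_eq_true_eq] at h
  obtain ⟨⟨⟨h1, h2⟩, h3⟩, h4⟩ := h
  unfold pvAllCells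
  have ha : a.toNat ∈ List.range grid.length := List.mem_range.2 (by omega)
  have hb : b.toNat ∈ List.range (grid.headD []).length := List.mem_range.2 (by omega)
  have he : (Int.ofNat a.toNat, Int.ofNat b.toNat) = (a, b) := by
    simp only [Prod.mk.injEq, Int.ofNat_eq_natCast]; omega
  exact List.mem_flatMap.2 ⟨a.toNat, ha, List.mem_map.2 ⟨b.toNat, hb, he⟩⟩

theorem pvCountP_lt {α : Type} (l : List α) (p q : α → Bool) (a : α)
    (ha : a ∈ l) (hpa : p a = false) (hqa : q a = true)
    (himp : ∀ x, p x = true → q x = true) : l.countP p < l.countP q := by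
  induction l with
  | nil => cases ha
  | cons x xs ih =>
    rcases List.mem_cons.1 ha with rfl | hx
    · have hle := List.countP_mono_left (l := xs) (fun x _ h => himp x h)
      simp [List.countP_cons, hpa, hqa]
      omega
    · have := ih hx
      by_cases hpx : p x = true
      · simp [hpx, himp x hpx]; omega
      · simp only [Bool.not_eq_true] at hpx
        simp [List.countP_cons, hpx]
        by_cases hqx : q x = true <;> simp [hqx] <;> omega

theorem pvMu_lt (grid : List (List String)) (p0 p : Int × Int) (v : List (Int × Int))
    (hp : p ∈ pvCells grid p0) (hv : p ∉ v) :
    pvMu grid p0 (v ++ [p]) < pvMu grid p0 v := by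
  simp only [pvMu, ← List.countP_eq_length_filter]
  refine pvCountP_lt _ _ _ p hp ?_ ?_ ?_
  · simp
  · simp [hv]
  · intro x hx
    simp only [decide_eq_true_eq, List.mem_append, List.mem_singleton] at hx ⊢
    exact fun h => hx (Or.inl h)

theorem pvMu_le_of_prefix (grid : List (List String)) (p0 : Int × Int)
    {v v' : List (Int × Int)} (h : v <+: v') : pvMu grid p0 v' ≤ pvMu grid p0 v := by
  simp only [pvMu, ← List.countP_eq_length_filter]
  refine List.countP_mono_left (fun x _ hx => ?_)
  simp at hx ⊢
  exact fun hm => hx (h.subset hm)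

theorem pvLength_allCells (grid : List (List String)) :
    (pvAllCells grid).length = grid.length * (grid.headD []).length := by
  simp [pvAllCells, List.length_flatMap]

theorem pvMu_nil (grid : List (List String)) (p0 : Int × Int) :
    pvMu grid p0 [] = 1 + grid.length * (grid.headD []).length := by
  simp [pvMu, pvCells, pvLength_allCells]
  omega

-- the A-side push is the B-side neighbour list, consed on ------------------

theorem pvFoldl_push (grid : List (List String)) (symbol wild : String) (p : Int × Int)
    (ds : List (Int × Int)) (st : List (Int × Int)) :
    ds.foldl (fun s d =>
      let n := (p.1 + d.1, p.2 + d.2)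
      if pvBnd grid n = true then
        if pvMat grid symbol wild n = true then n :: s else s
      else s) st
    = ((ds.reverse.map (fun d => (p.1 + d.1, p.2 + d.2))).filter (pvOkB grid symbol wild)) ++ st := by
  induction ds generalizing st with
  | nil => simp
  | cons d ds ih =>
    simp only [List.foldl_cons, ih, List.reverse_cons, List.map_append, List.filter_append,
      List.map_cons, List.map_nil, List.append_assoc]
    congr 1
    by_cases hb : pvBnd grid (p.1 + d.1, p.2 + d.2) = true
    · by_cases hm : pvMat grid symbol wild (p.1 + d.1, p.2 + d.2) = true
      · simp [hb, hm, List.filter, pvOkB]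
      · simp only [Bool.not_eq_true] at hm
        simp [hb, hm, List.filter, pvOkB]
    · simp only [Bool.not_eq_true] at hb
      simp [hb, List.filter, pvOkB]

theorem pvPush_eq (grid : List (List String)) (symbol wild : String) (p : Int × Int)
    (st : List (Int × Int)) :
    pvPush grid symbol wild p st = pvNbr grid symbol wild p ++ st := by
  have h := pvFoldl_push grid symbol wild p pvDirsA st
  simpa [pvPush, pvNbr, pvDirsA, pvDirsB] using h

theorem pvNbr_len_le (grid : List (List String)) (symbol wild : String) (p : Int × Int) :
    (pvNbr grid symbol wild p).length ≤ 4 := by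
  have h := List.length_filter_le (pvOkB grid symbol wild)
    ((pvDirsB.map (fun d => (p.1 + d.1, p.2 + d.2))))
  simpa [pvNbr, pvDirsB] using h

theorem pvNbr_mem_bnd (grid : List (List String)) (symbol wild : String) (p n : Int × Int)
    (h : n ∈ pvNbr grid symbol wild p) : pvBnd grid n = true := by
  simp only [pvNbr, List.mem_filter, List.mem_map] at h
  have := h.2
  simp only [pvOkB, Bool.and_eq_true] at this
  exact this.1

theorem pvTotA (grid : List (List String)) (symbol wild : String) (p0 : Int × Int) :
    ∀ N st v c, (∀ p ∈ st, p ∈ pvCells grid p0) →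
      5 * pvMu grid p0 v + st.length < N →
      ∃ r, pvLoopA grid symbol wild N st v c = some r := by
  intro N
  induction N with
  | zero => intro st v c _ hlt; omega
  | succ M ih =>
    intro st v c hinv hlt
    match st with
    | [] => exact ⟨c, by simp [pvLoopA]⟩
    | p :: st =>
      by_cases hm : p ∈ v
      · obtain ⟨r, hr⟩ := ih st v c (fun q hq => hinv q (List.mem_cons_of_mem _ hq))
          (by simp at hlt ⊢; omega)
        exact ⟨r, by simp only [pvLoopA, if_pos hm]; exact hr⟩
      · have hpc : p ∈ pvCells grid p0 := hinv p List.mem_cons_self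
        have hmu : pvMu grid p0 (v ++ [p]) < pvMu grid p0 v := pvMu_lt grid p0 p v hpc hm
        have hlen : (pvNbr grid symbol wild p).length ≤ 4 := pvNbr_len_le grid symbol wild p
        have hinv' : ∀ q ∈ pvPush grid symbol wild p st, q ∈ pvCells grid p0 := by
          intro q hq
          rw [pvPush_eq] at hq
          rcases List.mem_append.1 hq with hq | hq
          · exact List.mem_cons_of_mem _ (pvMem_allCells grid q (pvNbr_mem_bnd grid symbol wild p q hq))
          · exact hinv q (List.mem_cons_of_mem _ hq)
        obtain ⟨r, hr⟩ := ih (pvPush grid symbol wild p st) (v ++ [p]) (PySem.Set.add c p) hinv'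
          (by
            have : (pvPush grid symbol wild p st).length ≤ st.length + 4 := by
              rw [pvPush_eq, List.length_append]; omega
            simp at hlt
            omega)
        refine ⟨r, ?_⟩
        simp only [pvLoopA, if_neg hm]
        rw [pvSet_add_of_not_mem v p hm]
        exact hr

theorem pvMonoFB (grid : List (List String)) (symbol wild : String) :
    ∀ f, (∀ p v r, pvFill grid symbol wild f p v = some r →
            pvFill grid symbol wild (f + 1) p v = some r) ∧
         (∀ ds p v r, pvFillDirs grid symbol wild f ds p v = some r →
            pvFillDirs grid symbol wild (f + 1) ds p v = some r) := by
  intro f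
  induction f with
  | zero =>
    refine ⟨fun p v r h => by simp [pvFill] at h, ?_⟩
    intro ds
    induction ds with
    | nil => intro p v r h; simpa [pvFillDirs] using h
    | cons d ds ihds =>
      intro p v r h
      simp only [pvFillDirs] at h ⊢
      by_cases hok : pvOkB grid symbol wild (p.1 + d.1, p.2 + d.2) = true
      · rw [if_pos hok] at h
        simp [pvFill] at h
      · rw [if_neg hok] at h ⊢
        exact ihds p v r h
  | succ f ihf =>
    obtain ⟨mf, md⟩ := ihf
    have mf' : ∀ p v r, pvFill grid symbol wild (f + 1) p v = some r →
        pvFill grid symbol wild (f + 1 + 1) p v = some r := by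
      intro p v r h
      simp only [pvFill] at h ⊢
      by_cases hm : p ∈ v
      · rw [if_pos hm] at h ⊢; exact h
      · rw [if_neg hm] at h ⊢; exact md _ _ _ _ h
    refine ⟨mf', ?_⟩
    intro ds
    induction ds with
    | nil => intro p v r h; simpa [pvFillDirs] using h
    | cons d ds ihds =>
      intro p v r h
      simp only [pvFillDirs] at h ⊢
      by_cases hok : pvOkB grid symbol wild (p.1 + d.1, p.2 + d.2) = true
      · rw [if_pos hok] at h ⊢
        cases hf : pvFill grid symbol wild (f + 1) (p.1 + d.1, p.2 + d.2) v with
        | none => rw [hf] at h; simp at h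
        | some v' =>
          rw [hf] at h
          rw [mf' _ _ _ hf]
          exact ihds p v' r h
      · rw [if_neg hok] at h ⊢
        exact ihds p v r h

theorem pvPrefixFB (grid : List (List String)) (symbol wild : String) :
    ∀ f, (∀ p v r, pvFill grid symbol wild f p v = some r → v <+: r) ∧
         (∀ ds p v r, pvFillDirs grid symbol wild f ds p v = some r → v <+: r) := by
  intro f
  induction f with
  | zero =>
    refine ⟨fun p v r h => by simp [pvFill] at h, ?_⟩
    intro ds
    induction ds with
    | nil => intro p v r h; simp [pvFillDirs] at h; subst h; exact List.prefix_refl v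
    | cons d ds ihds =>
      intro p v r h
      simp only [pvFillDirs] at h
      by_cases hok : pvOkB grid symbol wild (p.1 + d.1, p.2 + d.2) = true
      · rw [if_pos hok] at h; simp [pvFill] at h
      · rw [if_neg hok] at h; exact ihds p v r h
  | succ f ihf =>
    obtain ⟨pf, pd⟩ := ihf
    have pf' : ∀ p v r, pvFill grid symbol wild (f + 1) p v = some r → v <+: r := by
      intro p v r h
      simp only [pvFill] at h
      by_cases hm : p ∈ v
      · rw [if_pos hm] at h; cases h; exact List.prefix_refl v
      · rw [if_neg hm, pvSet_add_of_not_mem v p hm] at h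
        exact (List.prefix_append v [p]).trans (pd _ _ _ _ h)
    refine ⟨pf', ?_⟩
    intro ds
    induction ds with
    | nil => intro p v r h; simp [pvFillDirs] at h; subst h; exact List.prefix_refl v
    | cons d ds ihds =>
      intro p v r h
      simp only [pvFillDirs] at h
      by_cases hok : pvOkB grid symbol wild (p.1 + d.1, p.2 + d.2) = true
      · rw [if_pos hok] at h
        cases hf : pvFill grid symbol wild (f + 1) (p.1 + d.1, p.2 + d.2) v with
        | none => rw [hf] at h; simp at h
        | some v' =>
          rw [hf] at h
          exact (pf' _ _ _ hf).trans (ihds p v' r h)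
      · rw [if_neg hok] at h
        exact ihds p v r h

theorem pvTotB (grid : List (List String)) (symbol wild : String) (p0 : Int × Int) :
    ∀ N p v, p ∈ pvCells grid p0 → pvMu grid p0 v < N →
      ∃ r, pvFill grid symbol wild N p v = some r := by
  intro N
  induction N with
  | zero => intro p v _ hlt; omega
  | succ M ih =>
    intro p v hp hlt
    by_cases hm : p ∈ v
    · exact ⟨v, by simp [pvFill, hm]⟩
    · have hmu : pvMu grid p0 (v ++ [p]) < pvMu grid p0 v := pvMu_lt grid p0 p v hp hm
      have inner : ∀ ds w, pvMu grid p0 w < M →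
          ∃ r, pvFillDirs grid symbol wild M ds p w = some r := by
        intro ds
        induction ds with
        | nil => intro w _; exact ⟨w, by simp [pvFillDirs]⟩
        | cons d ds ihds =>
          intro w hw
          by_cases hok : pvOkB grid symbol wild (p.1 + d.1, p.2 + d.2) = true
          · have hn : (p.1 + d.1, p.2 + d.2) ∈ pvCells grid p0 := by
              refine List.mem_cons_of_mem _ (pvMem_allCells grid _ ?_)
              simp only [pvOkB, Bool.and_eq_true] at hok
              exact hok.1
            obtain ⟨w', hw'⟩ := ih (p.1 + d.1, p.2 + d.2) w hn hw
            have hpre : w <+: w' := (pvPrefixFB grid symbol wild M).1 _ _ _ hw'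
            have hle : pvMu grid p0 w' ≤ pvMu grid p0 w := pvMu_le_of_prefix grid p0 hpre
            obtain ⟨r, hr⟩ := ihds w' (by omega)
            exact ⟨r, by simp only [pvFillDirs]; rw [if_pos hok, hw']; exact hr⟩
          · obtain ⟨r, hr⟩ := ihds w hw
            exact ⟨r, by simp only [pvFillDirs]; rw [if_neg hok]; exact hr⟩
      obtain ⟨r, hr⟩ := inner pvDirsB (v ++ [p]) (by omega)
      refine ⟨r, ?_⟩
      simp only [pvFill]
      rw [if_neg hm, pvSet_add_of_not_mem v p hm]
      exact hr

theorem pvMonoSeq (grid : List (List String)) (symbol wild : String) :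
    ∀ f st v r, pvFillSeq grid symbol wild f st v = some r →
      pvFillSeq grid symbol wild (f + 1) st v = some r := by
  intro f st
  induction st with
  | nil => intro v r h; simpa [pvFillSeq] using h
  | cons p st ih =>
    intro v r h
    simp only [pvFillSeq] at h ⊢
    cases hf : pvFill grid symbol wild f p v with
    | none => rw [hf] at h; simp at h
    | some v' =>
      rw [hf] at h
      rw [(pvMonoFB grid symbol wild f).1 _ _ _ hf]
      exact ih v' r h

theorem pvMonoB_le (grid : List (List String)) (symbol wild : String)
    {f g : Nat} (hfg : f ≤ g) (p : Int × Int) (v r : List (Int × Int))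
    (h : pvFill grid symbol wild f p v = some r) :
    pvFill grid symbol wild g p v = some r := by
  induction g, hfg using Nat.le_induction with
  | base => exact h
  | succ g hg ih => exact (pvMonoFB grid symbol wild g).1 _ _ _ ih

theorem pvSeq_append (grid : List (List String)) (symbol wild : String) (f : Nat) :
    ∀ a b v r, pvFillSeq grid symbol wild f (a ++ b) v = some r →
      ∃ w, pvFillSeq grid symbol wild f a v = some w ∧
           pvFillSeq grid symbol wild f b w = some r := by
  intro a
  induction a with
  | nil => intro b v r h; exact ⟨v, by simp [pvFillSeq], h⟩
  | cons p a ih =>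
    intro b v r h
    simp only [List.cons_append, pvFillSeq] at h
    cases hf : pvFill grid symbol wild f p v with
    | none => rw [hf] at h; simp at h
    | some v' =>
      rw [hf] at h
      obtain ⟨w, h1, h2⟩ := ih b v' r h
      exact ⟨w, by simp only [pvFillSeq]; rw [hf]; exact h1, h2⟩

theorem pvDirs_of_seq (grid : List (List String)) (symbol wild : String) (f : Nat) (p : Int × Int) :
    ∀ ds w r,
      pvFillSeq grid symbol wild f ((ds.map (fun d => (p.1 + d.1, p.2 + d.2))).filter (pvOkB grid symbol wild)) w = some r →
      pvFillDirs grid symbol wild f ds p w = some r := by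
  intro ds
  induction ds with
  | nil => intro w r h; simpa [pvFillSeq, pvFillDirs] using h
  | cons d ds ih =>
    intro w r h
    simp only [List.map_cons, List.filter_cons] at h
    by_cases hok : pvOkB grid symbol wild (p.1 + d.1, p.2 + d.2) = true
    · rw [if_pos hok] at h
      simp only [pvFillSeq] at h
      cases hf : pvFill grid symbol wild f (p.1 + d.1, p.2 + d.2) w with
      | none => rw [hf] at h; simp at h
      | some u =>
        rw [hf] at h
        simp only [pvFillDirs]
        rw [if_pos hok, hf]
        exact ih u r h
    · rw [if_neg hok] at h
      simp only [pvFillDirs]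
      rw [if_neg hok]
      exact ih w r h

theorem pvMain (grid : List (List String)) (symbol wild : String) :
    ∀ f st v r, pvLoopA grid symbol wild f st v v = some r →
      ∃ g, pvFillSeq grid symbol wild g st v = some r := by
  intro f
  induction f with
  | zero => intro st v r h; simp [pvLoopA] at h
  | succ f ih =>
    intro st v r h
    match st with
    | [] =>
      simp only [pvLoopA] at h
      cases h
      exact ⟨0, by simp [pvFillSeq]⟩
    | p :: st =>
      simp only [pvLoopA] at h
      by_cases hm : p ∈ v
      · rw [if_pos hm] at h
        obtain ⟨g, hg⟩ := ih st v r h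
        refine ⟨g + 1, ?_⟩
        simp only [pvFillSeq]
        have hfp : pvFill grid symbol wild (g + 1) p v = some v := by
          simp [pvFill, hm]
        rw [hfp]
        exact pvMonoSeq grid symbol wild g st v r hg
      · rw [if_neg hm, pvSet_add_of_not_mem v p hm, pvPush_eq] at h
        obtain ⟨g, hg⟩ := ih _ _ _ h
        obtain ⟨w, h1, h2⟩ := pvSeq_append grid symbol wild g _ st (v ++ [p]) r hg
        have hdirs : pvFillDirs grid symbol wild g pvDirsB p (v ++ [p]) = some w :=
          pvDirs_of_seq grid symbol wild g p pvDirsB (v ++ [p]) w h1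
        have hfill : pvFill grid symbol wild (g + 1) p v = some w := by
          simp only [pvFill]
          rw [if_neg hm, pvSet_add_of_not_mem v p hm]
          exact hdirs
        refine ⟨g + 1, ?_⟩
        simp only [pvFillSeq]
        rw [hfill]
        exact pvMonoSeq grid symbol wild g st w r h2

-- ===== VERDICT (by name: the statement is the Claim_ definition above) =====
theorem dfs_spec : Claim_equal_dfs := by
  intro i j grid wild _ hpre
  unfold Spec_dfs dfs dfs_alt
  obtain ⟨symbol, hsym⟩ := Option.isSome_iff_exists.1 hpre.2
  have hsym' : pvCell grid (i, j) = some symbol := hsym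
  rw [hsym']
  by_cases hsw : symbol = wild
  · simp [hsw]
  · simp only [if_neg hsw]
    have hstart : ∀ p ∈ [(i, j)], p ∈ pvCells grid (i, j) := by
      intro p hp
      simp only [List.mem_singleton] at hp
      subst hp
      exact List.mem_cons_self
    obtain ⟨rA, hA⟩ := pvTotA grid symbol wild (i, j) (pvFuelA grid) [(i, j)] [] []
      hstart (by rw [pvMu_nil]; unfold pvFuelA; simp only [List.length_cons, List.length_nil]; omega)
    obtain ⟨g, hgseq⟩ := pvMain grid symbol wild (pvFuelA grid) [(i, j)] [] rA hA
    have hfillA : pvFill grid symbol wild g (i, j) [] = some rA := by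
      simp only [pvFillSeq] at hgseq
      cases hf : pvFill grid symbol wild g (i, j) [] with
      | none => rw [hf] at hgseq; simp at hgseq
      | some v' =>
        rw [hf] at hgseq
        simp only [pvFillSeq] at hgseq
        cases hgseq
        rfl
    obtain ⟨rB, hB⟩ := pvTotB grid symbol wild (i, j) (pvFuelB grid) (i, j) []
      List.mem_cons_self (by rw [pvMu_nil]; unfold pvFuelB; omega)
    have e1 : pvFill grid symbol wild (g + pvFuelB grid) (i, j) [] = some rA :=
      pvMonoB_le grid symbol wild (Nat.le_add_right g _) _ _ _ hfillA
    have e2 : pvFill grid symbol wild (g + pvFuelB grid) (i, j) [] = some rB :=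
      pvMonoB_le grid symbol wild (Nat.le_add_left _ g) _ _ _ hB
    have hrr : rA = rB := by
      rw [e1] at e2
      exact (Option.some.injEq _ _ ▸ e2 : rA = rB)
    rw [hA, hB, hrr]
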